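-- pv_equiv track=rewrite | github.com/kathrynpotten/AdventOfCode2022 | scripts/08_Treetop_Tree_House.py | visible_from_left
-- ===== SOURCE A (Python) =====
-- def visible_from_left(row):
--     """ check row from LHS """
--     visible = []
--     row.reverse()
--     for i in range(len(row)):
--         if any(tree >= row[i] for tree in row[i+1:]):
--             continue
--         visible.append(i)
--     return len(visible)
-- ===== SOURCE B (Python) =====
-- def visible_from_left(row):
--     """ check row from LHS """
--     count = 0
--     tallest = None
--     for tree in row:
--         if tallest is None or tree > tallest:
--             count += 1
--             tallest = tree
--     return count
-- ===== Notes on version B (the rewrite author's own statement) =====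
-- stated objective: faster
-- what changed: replaced the quadratic scan (for each tree, re-scan all trees before it) by a single left-to-right pass tracking the running maximum; B also does not mutate the input (A reverses the list in place).
import Mathlib
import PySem

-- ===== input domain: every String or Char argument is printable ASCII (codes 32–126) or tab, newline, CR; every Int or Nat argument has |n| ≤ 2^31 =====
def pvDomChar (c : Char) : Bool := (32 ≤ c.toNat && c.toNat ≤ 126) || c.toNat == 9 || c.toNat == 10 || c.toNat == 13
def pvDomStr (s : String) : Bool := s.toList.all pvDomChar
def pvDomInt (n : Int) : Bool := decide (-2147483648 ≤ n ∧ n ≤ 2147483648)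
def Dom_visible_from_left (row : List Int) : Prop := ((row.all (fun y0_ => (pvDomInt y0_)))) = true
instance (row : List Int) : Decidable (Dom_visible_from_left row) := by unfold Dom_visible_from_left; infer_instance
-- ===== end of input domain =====

-- B replaces A's quadratic rescan by one pass with a running maximum (asymptotically faster);
-- equivalence is about the RETURN value only: A reverses its argument in place, B does not mutate it.

-- ===== PORT A =====
def visible_from_left (row : List Int) : Int :=
  let r := row.reverse
  let visible : List Int :=
    (PySem.List.pyRange 0 r.length 1).foldl
      (fun visible i =>
        if (PySem.List.slice r (some (i + 1)) none).any
             (fun tree => decide (PySem.List.pyGetD r i 0 ≤ tree))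
        then visible
        else visible ++ [i]) []
  (visible.length : Int)

-- ===== PORT B =====
def visible_from_left_alt (row : List Int) : Int :=
  (row.foldl
    (fun (st : Int × Option Int) tree =>
      match st.2 with
      | none => (st.1 + 1, some tree)
      | some m => if m < tree then (st.1 + 1, some tree) else st)
    (0, none)).1

-- ===== PRECONDITION & SPEC =====
def Spec_visible_from_left (row : List Int) (out : Int) : Prop := out = visible_from_left_alt row
instance (row : List Int) (out : Int) : Decidable (Spec_visible_from_left row out) := by unfold Spec_visible_from_left; infer_instance

-- ===== CLAIM (what is proved, stated in full; the proofs are below) =====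
def Claim_equal_visible_from_left : Prop := ∀ (row : List Int), Dom_visible_from_left row → Spec_visible_from_left row (visible_from_left row)

-- ===== LEMMAS AND PROOFS =====

-- A-side characterisation: count of elements strictly greater than everything AFTER them.
def pvFcnt : List Int → Nat
  | [] => 0
  | x :: t => (if ∀ z ∈ t, z < x then 1 else 0) + pvFcnt t

-- B-side characterisation: count of new records above running max m.
def pvRcnt : List Int → Int → Nat
  | [], _ => 0
  | x :: t, m => if m < x then 1 + pvRcnt t x else pvRcnt t m

def pvRec : List Int → Nat
  | [] => 0
  | x :: t => 1 + pvRcnt t x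

lemma pvLenfold (l : List Int) (cond : Int → Bool) (acc : List Int) :
    (l.foldl (fun a i => if cond i then a else a ++ [i]) acc).length
      = acc.length + l.countP (fun i => !cond i) := by
  induction l generalizing acc with
  | nil => simp
  | cons x t ih =>
    by_cases h : cond x
    · simp [List.foldl_cons, h, ih]
    · simp [List.foldl_cons, h, ih]
      omega

-- A's per-index condition, with a Nat index.
def pvC (r : List Int) (k : Nat) : Bool :=
  (r.drop (k + 1)).all (fun y => decide (y < r.getD k 0))

lemma pvCountP_range (r : List Int) :
    (List.range r.length).countP (pvC r) = pvFcnt r := by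
  induction r with
  | nil => simp [pvFcnt]
  | cons x t ih =>
    have hshift : ∀ k, pvC (x :: t) (k + 1) = pvC t k := by
      intro k; simp [pvC]
    rw [show (x :: t).length = t.length + 1 from rfl, List.range_succ_eq_map]
    rw [List.countP_cons, List.countP_map]
    have hcomp : pvC (x :: t) ∘ Nat.succ = pvC t := funext fun k => hshift k
    rw [hcomp, ih]
    show pvFcnt t + (if pvC (x :: t) 0 then 1 else 0) = pvFcnt (x :: t)
    rw [pvFcnt]
    simp only [pvC, List.drop_succ_cons, List.drop_zero, List.getD_cons_zero,
      List.all_eq_true, decide_eq_true_eq]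
    omega

-- Port A computes pvFcnt of the reversed list.
lemma pvA_eq (row : List Int) :
    visible_from_left row = (pvFcnt row.reverse : Int) := by
  simp only [visible_from_left]
  set r := row.reverse with hr
  rw [pvLenfold]
  congr 1
  rw [List.length_nil, Nat.zero_add]
  rw [PySem.List.pyRange_zero_nat, List.countP_map]
  rw [← pvCountP_range r]
  apply List.countP_congr
  intro k hk
  simp only [List.mem_range] at hk
  simp only [Function.comp]
  have hslice : PySem.List.slice r (some ((k : Int) + 1)) none = r.drop (k + 1) := by
    have h1 : ((k : Int) + 1) = (((k + 1 : Nat)) : Int) := by push_cast; ring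
    rw [h1, PySem.List.slice_from_natCast]
  rw [hslice, PySem.List.pyGetD_natCast]
  rw [pvC]
  rw [List.all_eq_not_any_not]
  simp

-- Port B computes pvRec.
lemma pvB_step (l : List Int) (c : Int) (m : Int) :
    (l.foldl
      (fun (st : Int × Option Int) tree =>
        match st.2 with
        | none => (st.1 + 1, some tree)
        | some m => if m < tree then (st.1 + 1, some tree) else st)
      (c, some m)).1 = c + (pvRcnt l m : Int) := by
  induction l generalizing c m with
  | nil => simp [pvRcnt]
  | cons x t ih =>
    rw [List.foldl_cons, pvRcnt]
    show (t.foldl _ (if m < x then (c + 1, some x) else (c, some m))).1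
        = c + ((if m < x then 1 + pvRcnt t x else pvRcnt t m : Nat) : Int)
    by_cases h : m < x
    · rw [if_pos h, if_pos h, ih]; push_cast; ring
    · rw [if_neg h, if_neg h, ih]

lemma pvB_eq (row : List Int) :
    visible_from_left_alt row = (pvRec row : Int) := by
  cases row with
  | nil => simp [visible_from_left_alt, pvRec]
  | cons x t =>
    unfold visible_from_left_alt pvRec
    rw [List.foldl_cons]
    show (t.foldl _ (0 + 1, some x)).1 = _
    rw [pvB_step]; push_cast; ring

-- appending a last element to pvRcnt
lemma pvRcnt_append (t : List Int) (x : Int) :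
    ∀ m, pvRcnt (t ++ [x]) m
      = pvRcnt t m + (if m < x ∧ ∀ z ∈ t, z < x then 1 else 0) := by
  induction t with
  | nil =>
    intro m; by_cases h : m < x <;> simp [pvRcnt, h]
  | cons y t' ih =>
    intro m
    by_cases h : m < y
    · simp only [List.cons_append, pvRcnt, if_pos h, ih y]
      have hc : (m < x ∧ ∀ z ∈ y :: t', z < x) ↔ (y < x ∧ ∀ z ∈ t', z < x) := by
        simp only [List.forall_mem_cons]
        constructor
        · rintro ⟨_, hy, ht⟩; exact ⟨hy, ht⟩
        · rintro ⟨hy, ht⟩; exact ⟨by omega, hy, ht⟩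
      rw [if_congr hc rfl rfl]
      omega
    · simp only [List.cons_append, pvRcnt, if_neg h, ih m]
      have hc : (m < x ∧ ∀ z ∈ y :: t', z < x) ↔ (m < x ∧ ∀ z ∈ t', z < x) := by
        simp only [List.forall_mem_cons]
        constructor
        · rintro ⟨hm, _, ht⟩; exact ⟨hm, ht⟩
        · rintro ⟨hm, ht⟩; exact ⟨hm, by omega, ht⟩
      rw [if_congr hc rfl rfl]

lemma pvRec_append (t : List Int) (x : Int) :
    pvRec (t ++ [x]) = pvRec t + (if ∀ z ∈ t, z < x then 1 else 0) := by
  cases t with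
  | nil => simp [pvRec, pvRcnt]
  | cons y t' =>
    simp only [List.cons_append, pvRec, pvRcnt_append]
    have hc : (∀ z ∈ y :: t', z < x) ↔ (y < x ∧ ∀ z ∈ t', z < x) := List.forall_mem_cons
    rw [if_congr hc rfl rfl]
    omega

lemma pvFcnt_eq_pvRec_reverse (l : List Int) : pvFcnt l = pvRec l.reverse := by
  induction l with
  | nil => simp [pvFcnt, pvRec]
  | cons x t ih =>
    rw [pvFcnt, ih, List.reverse_cons, pvRec_append]
    have hc : (∀ z ∈ t.reverse, z < x) ↔ (∀ z ∈ t, z < x) := by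
      simp [List.mem_reverse]
    rw [if_congr hc rfl rfl]
    omega

-- ===== VERDICT (by name: the statement is the Claim_ definition above) =====
theorem visible_from_left_spec : Claim_equal_visible_from_left := by
  intro row _
  unfold Spec_visible_from_left
  rw [pvA_eq, pvB_eq, pvFcnt_eq_pvRec_reverse, List.reverse_reverse]
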